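-- pv_equiv track=rewrite | github.com/aria-ml/dataeval | src/dataeval/quality/_duplicates.py | _merge_near_groups
-- ===== SOURCE A (Python) =====
-- from collections.abc import Mapping, Sequence
-- from typing import Any, Generic, Literal, TypeVar, overload
--
-- _BASIC_HASH_METHODS = frozenset({"phash", "dhash"})
--
-- _D4_HASH_METHODS = frozenset({"phash_d4", "dhash_d4"})
--
-- def _get_orientation(methods: frozenset[str]) -> Literal["rotated", "same"]:
--     """Determine orientation based on which methods detected the group."""
--     has_basic = bool(methods & _BASIC_HASH_METHODS)
--     has_d4 = bool(methods & _D4_HASH_METHODS)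
--     if has_d4 and not has_basic:
--         return "rotated"
--     return "same"
--
-- def _merge_near_groups(
--     method_groups: Sequence[tuple[Sequence[Any], str]],
--     available_stats: set[str],
--     merge: bool,
-- ) -> list[tuple[tuple[Any, ...], frozenset[str], str | None]]:
--     """Merge overlapping near-duplicate groups and compute orientation.
--
--     Parameters
--     ----------
--     method_groups : Sequence[tuple[Sequence[Any], str]]
--         List of (indices, method_name) tuples from each detection method.
--     available_stats : set[str]
--         Set of hash types that were computed (e.g., {"phash", "dhash", "phash_d4"}).
--     merge : bool
--         Whether to merge overlapping groups from different methods.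
--
--     Returns
--     -------
--     list[tuple[tuple[Any, ...], frozenset[str], str | None]]
--         Each element is (sorted_indices, methods, orientation).
--     """
--     if not method_groups:
--         return []
--
--     # Determine if we can compute orientation (need both basic and D4 hashes)
--     has_basic_stats = bool(available_stats & _BASIC_HASH_METHODS)
--     has_d4_stats = bool(available_stats & _D4_HASH_METHODS)
--     is_unknown = not (has_basic_stats and has_d4_stats)
--
--     if not merge:
--         # Keep groups separate - each group has a single method
--         groups = [
--             (
--                 tuple(sorted(group)),
--                 frozenset({method}),
--                 None if is_unknown else _get_orientation(frozenset({method})),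
--             )
--             for group, method in method_groups
--         ]
--         return sorted(groups, key=lambda g: g[0])
--
--     # Merge overlapping groups and union their methods
--     # Each entry: (set of indices, set of methods)
--     merged: list[tuple[set[Any], set[str]]] = []
--
--     for group, method in method_groups:
--         group_set = set(group)
--         overlapping_indices: list[int] = []
--
--         for i, (existing_set, _) in enumerate(merged):
--             if existing_set & group_set:  # Any overlap
--                 overlapping_indices.append(i)
--
--         if not overlapping_indices:
--             # No overlap - add as new group
--             merged.append((group_set, {method}))
--         else:
--             # Merge with all overlapping groups
--             new_indices = group_set.copy()
--             new_methods = {method}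
--             for i in sorted(overlapping_indices, reverse=True):
--                 existing_indices, existing_methods = merged.pop(i)
--                 new_indices |= existing_indices
--                 new_methods |= existing_methods
--             merged.append((new_indices, new_methods))
--
--     result = [
--         (
--             tuple(sorted(indices)),
--             frozenset(methods),
--             None if is_unknown else _get_orientation(frozenset(methods)),
--         )
--         for indices, methods in merged
--         if len(indices) > 1
--     ]
--     return sorted(result, key=lambda g: g[0])
-- ===== SOURCE B (Python) =====
-- _BASIC_HASH_METHODS = frozenset({"phash", "dhash"})
-- _D4_HASH_METHODS = frozenset({"phash_d4", "dhash_d4"})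
--
--
-- def _merge_near_groups(method_groups, available_stats, merge):
--     is_unknown = available_stats.isdisjoint(_BASIC_HASH_METHODS) or available_stats.isdisjoint(
--         _D4_HASH_METHODS
--     )
--
--     if not merge:
--         out = [
--             (
--                 tuple(sorted(group)),
--                 frozenset({m}),
--                 None if is_unknown else ("rotated" if m in _D4_HASH_METHODS else "same"),
--             )
--             for group, m in method_groups
--         ]
--         out.sort(key=lambda t: t[0])
--         return out
--
--     # Dict-indexed merging: comp_of maps each seen index to its component id,
--     # so overlapping components are found by direct lookups instead of scanning
--     # every existing component with a set intersection.
--     comp_of = {}  # index -> component id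
--     comps = {}  # component id -> (index set, method set); dict keeps last-merge order
--     next_id = 0
--     for group, m in method_groups:
--         ids = {comp_of[ix] for ix in group if ix in comp_of}
--         new_ix, new_m = set(group), {m}
--         for cid in sorted(ids, reverse=True):
--             xs, ms = comps.pop(cid)
--             new_ix |= xs
--             new_m |= ms
--         comps[next_id] = (new_ix, new_m)
--         for ix in new_ix:
--             comp_of[ix] = next_id
--         next_id += 1
--
--     result = [
--         (
--             tuple(sorted(xs)),
--             frozenset(ms),
--             None
--             if is_unknown
--             else ("rotated" if (ms & _D4_HASH_METHODS) and ms.isdisjoint(_BASIC_HASH_METHODS) else "same"),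
--         )
--         for xs, ms in comps.values()
--         if len(xs) > 1
--     ]
--     result.sort(key=lambda t: t[0])
--     return result
-- ===== Notes on version B (the rewrite author's own statement) =====
-- stated objective: alternative
-- what changed: B replaces A's per-group scan over all existing merged groups (a set intersection with each) by a dict mapping each index to its component id, so overlapping components are found by direct per-index lookups and merged via an insertion-ordered component dict.
import Mathlib
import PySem

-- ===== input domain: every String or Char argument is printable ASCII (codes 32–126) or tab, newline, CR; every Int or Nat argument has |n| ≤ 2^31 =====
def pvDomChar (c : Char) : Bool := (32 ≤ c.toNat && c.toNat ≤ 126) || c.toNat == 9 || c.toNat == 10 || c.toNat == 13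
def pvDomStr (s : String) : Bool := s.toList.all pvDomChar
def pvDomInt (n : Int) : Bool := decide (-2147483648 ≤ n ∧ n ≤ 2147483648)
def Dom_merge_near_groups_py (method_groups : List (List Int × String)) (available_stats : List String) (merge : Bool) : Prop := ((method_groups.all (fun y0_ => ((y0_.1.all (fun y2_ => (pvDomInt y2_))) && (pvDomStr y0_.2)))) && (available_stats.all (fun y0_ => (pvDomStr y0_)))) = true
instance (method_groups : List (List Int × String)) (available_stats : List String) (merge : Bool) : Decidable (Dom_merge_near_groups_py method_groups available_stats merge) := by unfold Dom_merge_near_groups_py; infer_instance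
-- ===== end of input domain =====

-- B (alternative algorithm): instead of A's scan of all existing merged groups
-- with a set intersection per group, B keeps a dict from index to component id
-- and finds overlapping components by direct per-index lookups.

-- ===== PORT A =====
def pvBasicM : List String := ["phash", "dhash"]
def pvD4M : List String := ["phash_d4", "dhash_d4"]

-- _get_orientation
def pvGetOrientation (methods : PySem.Set String) : String :=
  let has_basic := !(PySem.Set.inter methods pvBasicM).isEmpty
  let has_d4 := !(PySem.Set.inter methods pvD4M).isEmpty
  if has_d4 && !has_basic then "rotated" else "same"

-- one iteration of A's merging loop (body of `for group, method in method_groups`)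
def pvStepA (merged : List (PySem.Set Int × PySem.Set String)) (gm : List Int × String) :
    List (PySem.Set Int × PySem.Set String) :=
  let group_set := PySem.Set.ofList gm.1
  let overlapping : List Int := (PySem.List.enumerate merged 0).foldl
      (fun acc p => if !(PySem.Set.inter p.2.1 group_set).isEmpty then acc ++ [p.1] else acc) []
  if overlapping = [] then
    merged ++ [(group_set, PySem.Set.ofList [gm.2])]
  else
    let st := (PySem.List.sorted overlapping (fun x => x) true).foldl
        (fun (st : List (PySem.Set Int × PySem.Set String) × PySem.Set Int × PySem.Set String) i =>
          match PySem.List.pop? st.1 i with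
          | some (c, rest) => (rest, (PySem.Set.union st.2.1 c.1, PySem.Set.union st.2.2 c.2))
          | none => st)  -- unreachable: every popped position is a valid index of st.1
        (merged, (group_set, PySem.Set.ofList [gm.2]))
    st.1 ++ [st.2]

def merge_near_groups_py (method_groups : List (List Int × String)) (available_stats : List String) (merge : Bool) : List (List Int × List String × Option String) :=
  if method_groups = [] then [] else
  let has_basic_stats := !(PySem.Set.inter available_stats pvBasicM).isEmpty
  let has_d4_stats := !(PySem.Set.inter available_stats pvD4M).isEmpty
  let is_unknown := !(has_basic_stats && has_d4_stats)
  if !merge then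
    let groups := method_groups.map (fun gm =>
      (PySem.List.sorted gm.1 (fun x => x) false,
       (PySem.Set.ofList [gm.2],
        if is_unknown then none else some (pvGetOrientation (PySem.Set.ofList [gm.2])))))
    PySem.List.sorted groups (fun g => g.1) false
  else
    let merged := method_groups.foldl pvStepA []
    let result := (merged.filter (fun c => 1 < PySem.Set.len c.1)).map (fun c =>
      (PySem.List.sorted c.1 (fun x => x) false,
       (c.2, if is_unknown then none else some (pvGetOrientation c.2))))
    PySem.List.sorted result (fun g => g.1) false

-- ===== PORT B =====
-- one iteration of B's merging loop: state (comp_of, comps, next_id)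
def pvStepB (st : PySem.Dict Int Int × PySem.Dict Int (PySem.Set Int × PySem.Set String) × Int)
    (gm : List Int × String) :
    PySem.Dict Int Int × PySem.Dict Int (PySem.Set Int × PySem.Set String) × Int :=
  let ids : PySem.Set Int := PySem.Set.ofList (gm.1.filterMap (fun ix => st.1.get? ix))
  let p := (PySem.List.sorted ids (fun x => x) true).foldl
      (fun (p : PySem.Dict Int (PySem.Set Int × PySem.Set String) × PySem.Set Int × PySem.Set String) cid =>
        match PySem.Dict.pop? p.1 cid with
        | some (c, rest) => (rest, (PySem.Set.union p.2.1 c.1, PySem.Set.union p.2.2 c.2))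
        | none => p)  -- unreachable: every id in `ids` is a key of `comps`
      (st.2.1, (PySem.Set.ofList gm.1, ([gm.2] : PySem.Set String)))
  let comps2 := p.1.insert st.2.2 p.2
  let comp_of2 := p.2.1.foldl (fun d ix => d.insert ix st.2.2) st.1
  (comp_of2, comps2, st.2.2 + 1)

def merge_near_groups_py_alt (method_groups : List (List Int × String)) (available_stats : List String) (merge : Bool) : List (List Int × List String × Option String) :=
  let is_unknown := PySem.Set.isdisjoint available_stats pvBasicM || PySem.Set.isdisjoint available_stats pvD4M
  if !merge then
    let out := method_groups.map (fun gm =>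
      (PySem.List.sorted gm.1 (fun x => x) false,
       (([gm.2] : PySem.Set String),
        if is_unknown then none
        else some (if pvD4M.contains gm.2 then "rotated" else "same"))))
    PySem.List.sorted out (fun t => t.1) false
  else
    let st := method_groups.foldl pvStepB (PySem.Dict.empty, PySem.Dict.empty, 0)
    let result := (st.2.1.values.filter (fun c => 1 < PySem.Set.len c.1)).map (fun c =>
      (PySem.List.sorted c.1 (fun x => x) false,
       (c.2,
        if is_unknown then none
        else some (if !(PySem.Set.inter c.2 pvD4M).isEmpty && PySem.Set.isdisjoint c.2 pvBasicM then "rotated" else "same"))))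
    PySem.List.sorted result (fun t => t.1) false

-- ===== PRECONDITION & SPEC =====
def Spec_merge_near_groups_py (method_groups : List (List Int × String)) (available_stats : List String) (merge : Bool) (out : List (List Int × List String × Option String)) : Prop := out = merge_near_groups_py_alt method_groups available_stats merge
instance (method_groups : List (List Int × String)) (available_stats : List String) (merge : Bool) (out : List (List Int × List String × Option String)) : Decidable (Spec_merge_near_groups_py method_groups available_stats merge out) := by unfold Spec_merge_near_groups_py; infer_instance

-- ===== CLAIM (what is proved, stated in full; the proofs are below) =====
def Claim_equal_merge_near_groups_py : Prop := ∀ (method_groups : List (List Int × String)) (available_stats : List String) (merge : Bool), Dom_merge_near_groups_py method_groups available_stats merge → Spec_merge_near_groups_py method_groups available_stats merge (merge_near_groups_py method_groups available_stats merge)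

-- ===== LEMMAS AND PROOFS =====

abbrev pvComp := PySem.Set Int × PySem.Set String

def pvOv (g : List Int) (c : pvComp) : Bool := !(PySem.Set.inter c.1 (PySem.Set.ofList g)).isEmpty

lemma pv_isEmpty_inter {α : Type} [BEq α] [LawfulBEq α] (s t : PySem.Set α) :
    (PySem.Set.inter s t).isEmpty = PySem.Set.isdisjoint s t := by
  rw [Bool.eq_iff_iff, List.isEmpty_iff, PySem.Set.isdisjoint_iff, List.eq_nil_iff_forall_not_mem]
  constructor
  · intro h x hx hxt
    exact h x ((PySem.Set.mem_inter s t x).2 ⟨hx, hxt⟩)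
  · intro h x hx
    obtain ⟨h1, h2⟩ := (PySem.Set.mem_inter s t x).1 hx
    exact h x h1 h2

lemma pv_ov_iff (g : List Int) (c : pvComp) :
    pvOv g c = true ↔ ∃ ix ∈ g, ix ∈ c.1 := by
  rw [pvOv, Bool.not_eq_eq_eq_not, Bool.not_true]
  rw [show (List.isEmpty (PySem.Set.inter c.1 (PySem.Set.ofList g)) = false) ↔
      ¬(List.isEmpty (PySem.Set.inter c.1 (PySem.Set.ofList g)) = true) by simp]
  rw [List.isEmpty_iff, ← ne_eq, show (PySem.Set.inter c.1 (PySem.Set.ofList g) ≠ [] ↔ ∃ x, x ∈ PySem.Set.inter c.1 (PySem.Set.ofList g)) by rw [← List.isEmpty_eq_false_iff_exists_mem]; simp]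
  constructor
  · rintro ⟨x, hx⟩
    obtain ⟨h1, h2⟩ := (PySem.Set.mem_inter _ _ x).1 hx
    exact ⟨x, (PySem.Set.mem_ofList g x).1 h2, h1⟩
  · rintro ⟨ix, h1, h2⟩
    exact ⟨ix, (PySem.Set.mem_inter _ _ ix).2 ⟨h2, (PySem.Set.mem_ofList g ix).2 h1⟩⟩

def pvComb (a c : pvComp) : pvComp := (PySem.Set.union a.1 c.1, PySem.Set.union a.2 c.2)

lemma pv_mem_fold_union (L : List pvComp) (a0 : pvComp) (x : Int) :
    x ∈ (L.foldl pvComb a0).1 ↔ x ∈ a0.1 ∨ ∃ c ∈ L, x ∈ c.1 := by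
  induction L generalizing a0 with
  | nil => simp
  | cons c L ih =>
    simp [List.foldl_cons, ih, pvComb, PySem.Set.mem_union]
    tauto

def pvPopStep (st : List pvComp × pvComp) (i : Int) : List pvComp × pvComp :=
  match PySem.List.pop? st.1 i with
  | some (c, rest) => (rest, pvComb st.2 c)
  | none => st

lemma pv_eraseIdx_append (M T : List pvComp) (c : pvComp) :
    (M ++ c :: T).eraseIdx M.length = M ++ T := by
  induction M with
  | nil => simp
  | cons a M ih => simp [List.eraseIdx_cons_succ, ih]

lemma pv_pop?_append (M T : List pvComp) (c : pvComp) :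
    PySem.List.pop? (M ++ c :: T) (M.length : Int) = some (c, M ++ T) := by
  have h1 : (M ++ c :: T)[M.length]? = some c := by simp
  simp [PySem.List.pop?, PySem.List.pyIdx?, pv_eraseIdx_append]

lemma pv_popfold (b : pvComp → Bool) (M : List pvComp) : ∀ (T : List pvComp) (acc : pvComp),
    ((((PySem.List.enumerate M 0).filter (fun p => b p.2)).map Prod.fst).reverse).foldl
        pvPopStep (M ++ T, acc)
      = (M.filter (fun c => !b c) ++ T, (M.filter b).reverse.foldl pvComb acc) := by
  induction M using List.reverseRecOn with
  | nil => intro T acc; simp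
  | append_singleton M c ih =>
    intro T acc
    rw [PySem.List.enumerate_append]
    simp only [List.filter_append, List.map_append, List.reverse_append]
    by_cases hb : b c
    · have he : ((PySem.List.enumerate [c] (0 + M.length)).filter (fun p => b p.2)).map Prod.fst
          = [(M.length : Int)] := by
        simp [PySem.List.enumerate, hb]
      rw [he]
      simp only [List.reverse_cons, List.reverse_nil, List.nil_append, List.foldl_cons]
      have hstep : pvPopStep (M ++ [c] ++ T, acc) (M.length : Int) = (M ++ T, pvComb acc c) := by
        simp only [pvPopStep, List.append_assoc, List.singleton_append, pv_pop?_append]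
      rw [List.singleton_append, List.foldl_cons, hstep, ih T (pvComb acc c)]
      simp [hb]
    · have he : ((PySem.List.enumerate [c] (0 + M.length)).filter (fun p => b p.2)).map Prod.fst
          = ([] : List Int) := by
        simp [PySem.List.enumerate, hb]
      rw [he]
      simp only [List.reverse_nil, List.nil_append]
      rw [List.append_assoc, List.singleton_append, ih (c :: T) acc]
      simp [hb, List.filter_cons]

def pvNew (gm : List Int × String) (M : List pvComp) : pvComp :=
  (M.filter (pvOv gm.1)).reverse.foldl pvComb (PySem.Set.ofList gm.1, PySem.Set.ofList [gm.2])

lemma pv_stepA_eq (M : List pvComp) (gm : List Int × String) :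
    pvStepA M gm = M.filter (fun c => !pvOv gm.1 c) ++ [pvNew gm M] := by
  unfold pvStepA
  simp only []
  rw [show (fun (st : List (PySem.Set Int × PySem.Set String) × PySem.Set Int × PySem.Set String) (i : Int) =>
        match PySem.List.pop? st.1 i with
        | some (c, rest) => (rest, (PySem.Set.union st.2.1 c.1, PySem.Set.union st.2.2 c.2))
        | none => st) = pvPopStep from rfl]
  rw [show (fun acc (p : Int × pvComp) => if !(PySem.Set.inter p.2.1 (PySem.Set.ofList gm.1)).isEmpty then acc ++ [p.1] else acc)
      = (fun acc (p : Int × pvComp) => if pvOv gm.1 p.2 then acc ++ [p.1] else acc) from rfl]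
  rw [PySem.List.foldl_append_if (fun p => pvOv gm.1 p.2) Prod.fst (PySem.List.enumerate M 0) []]
  rw [List.nil_append]
  have hmemM : ∀ c ∈ M, ∃ p ∈ PySem.List.enumerate M 0, p.2 = c := by
    intro c hc
    have : c ∈ (PySem.List.enumerate M 0).map Prod.snd := by
      rw [show (PySem.List.enumerate M 0).map Prod.snd = M from PySem.List.map_snd_enumerate M 0]
      exact hc
    obtain ⟨p, hp, he⟩ := List.mem_map.1 this
    exact ⟨p, hp, he⟩
  by_cases hov : (List.filter (fun p => pvOv gm.1 p.2) (PySem.List.enumerate M 0)) = []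
  · have hall : ∀ c ∈ M, pvOv gm.1 c = false := by
      intro c hc
      obtain ⟨p, hp, he⟩ := hmemM c hc
      have := List.filter_eq_nil_iff.1 hov p hp
      rw [he] at this
      simpa using this
    rw [hov]
    simp only [List.map_nil, reduceIte]
    rw [List.filter_eq_self.2 (by intro c hc; simp [hall c hc]),
        pvNew, List.filter_eq_nil_iff.2 (by intro c hc; simp [hall c hc])]
    simp
  · have hne : (List.filter (fun p => pvOv gm.1 p.2) (PySem.List.enumerate M 0)).map Prod.fst ≠ [] := by
      simpa using hov
    rw [if_neg hne]
    have hpw : ((List.filter (fun p => pvOv gm.1 p.2) (PySem.List.enumerate M 0)).map Prod.fst).Pairwise (· < ·) := by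
      apply List.Pairwise.map
      · exact fun a b h => h
      · exact List.Pairwise.filter _ (PySem.List.pairwise_lt_enumerate M 0)
    have hsorted : PySem.List.sorted ((List.filter (fun p => pvOv gm.1 p.2) (PySem.List.enumerate M 0)).map Prod.fst) (fun x => x) true
        = ((List.filter (fun p => pvOv gm.1 p.2) (PySem.List.enumerate M 0)).map Prod.fst).reverse := by
      apply PySem.List.sorted_rev_eq_of_perm_of_pairwise_gt
      · exact List.reverse_perm _
      · rw [List.pairwise_reverse]
        exact hpw
    rw [hsorted]
    have := pv_popfold (pvOv gm.1) M [] (PySem.Set.ofList gm.1, PySem.Set.ofList [gm.2])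
    rw [List.append_nil] at this
    rw [this]
    simp [pvNew]

def pvPopStepB (p : PySem.Dict Int pvComp × pvComp) (cid : Int) : PySem.Dict Int pvComp × pvComp :=
  match PySem.Dict.pop? p.1 cid with
  | some (c, rest) => (rest, pvComb p.2 c)
  | none => p

lemma pv_find?_filter_ne (items : List (Int × pvComp)) (k k' : Int) (h : k' ≠ k) :
    List.find? (fun p => p.1 == k') (items.filter (fun p => !p.1 == k))
      = List.find? (fun p => p.1 == k') items := by
  induction items with
  | nil => simp
  | cons p rest ih =>
    by_cases h2 : p.1 = k
    · rw [List.filter_cons, if_neg (by simp [h2]), List.find?_cons, ih]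
      have : (p.1 == k') = false := by simp [h2]; omega
      rw [this]
    · rw [List.filter_cons, if_pos (by simp [h2]), List.find?_cons, List.find?_cons]
      cases hpk : (p.1 == k') <;> simp only [hpk, ih]

lemma pv_get?_erase (d : PySem.Dict Int pvComp) (k k' : Int) :
    (d.erase k).get? k' = if k' = k then none else d.get? k' := by
  by_cases h1 : k' = k
  · subst h1
    rw [if_pos rfl]
    have : List.find? (fun p => p.1 == k') ((d.erase k').items) = none := by
      apply List.find?_eq_none.2
      intro p hp
      have := (List.mem_filter.1 hp).2
      simpa using this
    simp only [PySem.Dict.get?, PySem.Dict.erase] at this ⊢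
    rw [this]
    rfl
  · rw [if_neg h1]
    simp only [PySem.Dict.get?, PySem.Dict.erase]
    rw [pv_find?_filter_ne _ _ _ h1]

lemma pv_dict_popfold (ks : List Int) (vals : Int → pvComp) :
    ∀ (d : PySem.Dict Int pvComp) (acc : pvComp), ks.Nodup →
    (∀ k ∈ ks, d.get? k = some (vals k)) →
    ks.foldl pvPopStepB (d, acc)
      = (PySem.Dict.mk (d.items.filter (fun p => !(ks.contains p.1))),
         ks.foldl (fun a k => pvComb a (vals k)) acc) := by
  induction ks with
  | nil =>
    intro d acc _ _
    simp only [List.foldl_nil]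
    obtain ⟨items⟩ := d
    simp
  | cons k ks ih =>
    intro d acc hnd hget
    have hk : d.get? k = some (vals k) := hget k (by simp)
    have hstep : pvPopStepB (d, acc) k = (d.erase k, pvComb acc (vals k)) := by
      simp [pvPopStepB, PySem.Dict.pop?, hk]
    rw [List.foldl_cons, hstep, List.foldl_cons]
    have hnd' : ks.Nodup := hnd.of_cons
    have hknots : k ∉ ks := by simp at hnd; exact hnd.1
    have hget' : ∀ k' ∈ ks, (d.erase k).get? k' = some (vals k') := by
      intro k' hk'
      rw [pv_get?_erase, if_neg (by rintro rfl; exact hknots hk')]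
      exact hget k' (by simp [hk'])
    rw [ih (d.erase k) (pvComb acc (vals k)) hnd' hget']
    congr 1
    simp only [PySem.Dict.erase, List.filter_filter]
    apply congrArg PySem.Dict.mk
    apply List.filter_congr
    intro p _
    simp only [List.contains_cons]
    cases h1 : (p.1 == k) <;> cases h2 : (ks.contains p.1) <;> simp [h1, h2]

lemma pv_get?_foldl_insert (l : List Int) (v : Int) :
    ∀ (f : PySem.Dict Int Int) (x : Int),
    (l.foldl (fun d ix => d.insert ix v) f).get? x = if x ∈ l then some v else f.get? x := by
  induction l with
  | nil => intro f x; simp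
  | cons a l ih =>
    intro f x
    rw [List.foldl_cons, ih]
    by_cases hx : x ∈ l
    · simp [hx]
    · rw [if_neg hx, PySem.Dict.get?_insert]
      by_cases hxa : x = a <;> simp [hxa, hx]

def pvInv (M : List pvComp) (f : PySem.Dict Int Int)
    (C : PySem.Dict Int pvComp) (n : Int) : Prop :=
  C.items.map Prod.snd = M ∧
  (C.items.map Prod.fst).Pairwise (· < ·) ∧
  (∀ k ∈ C.items.map Prod.fst, k < n) ∧
  (∀ ix cid, f.get? ix = some cid ↔ ∃ c, (cid, c) ∈ C.items ∧ ix ∈ c.1)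

lemma pv_step_inv (M : List pvComp) (f : PySem.Dict Int Int)
    (C : PySem.Dict Int pvComp) (n : Int) (gm : List Int × String)
    (h : pvInv M f C n) :
    pvInv (pvStepA M gm) (pvStepB (f, C, n) gm).1 (pvStepB (f, C, n) gm).2.1
      (pvStepB (f, C, n) gm).2.2 := by
  obtain ⟨hM, hpw, hlt, hf⟩ := h
  have hknd : (C.items.map Prod.fst).Nodup := hpw.imp (fun hab => ne_of_lt hab)
  have hinj : ∀ p ∈ C.items, ∀ p' ∈ C.items, p.1 = p'.1 → p = p' :=
    List.inj_on_of_nodup_map hknd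
  -- the overlapping entries, in dict order
  set L := C.items.filter (fun p => pvOv gm.1 p.2) with hL
  set ks := (L.map Prod.fst).reverse with hks
  -- ids of B = keys of the overlapping entries
  have hLsub : L.Sublist C.items := List.filter_sublist
  have hLpw : (L.map Prod.fst).Pairwise (· < ·) := List.Pairwise.sublist (hLsub.map Prod.fst) hpw
  have hLnd : (L.map Prod.fst).Nodup := hknd.sublist (hLsub.map Prod.fst)
  have hmemks : ∀ cid, cid ∈ ks ↔ ∃ c, (cid, c) ∈ C.items ∧ pvOv gm.1 c = true := by
    intro cid
    rw [hks, List.mem_reverse, List.mem_map]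
    constructor
    · rintro ⟨p, hp, rfl⟩
      obtain ⟨hpi, hov⟩ := List.mem_filter.1 hp
      exact ⟨p.2, by simpa using hpi, by simpa using hov⟩
    · rintro ⟨c, hci, hov⟩
      exact ⟨(cid, c), List.mem_filter.2 ⟨hci, by simpa using hov⟩, rfl⟩
  have hids : ∀ cid, cid ∈ PySem.Set.ofList (gm.1.filterMap (fun ix => f.get? ix)) ↔ cid ∈ ks := by
    intro cid
    rw [PySem.Set.mem_ofList, List.mem_filterMap, hmemks cid]
    constructor
    · rintro ⟨ix, hixg, hgot⟩
      obtain ⟨c, hci, hixc⟩ := (hf ix cid).1 hgot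
      exact ⟨c, hci, (pv_ov_iff gm.1 c).2 ⟨ix, hixg, hixc⟩⟩
    · rintro ⟨c, hci, hov⟩
      obtain ⟨ix, hixg, hixc⟩ := (pv_ov_iff gm.1 c).1 hov
      exact ⟨ix, hixg, (hf ix cid).2 ⟨c, hci, hixc⟩⟩
  have hsorted : PySem.List.sorted (PySem.Set.ofList (gm.1.filterMap (fun ix => f.get? ix))) (fun x => x) true = ks := by
    apply PySem.List.sorted_rev_eq_of_perm_of_pairwise_gt
    · exact (List.perm_ext_iff_of_nodup (by rw [hks]; exact List.nodup_reverse.2 hLnd)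
        (PySem.Set.nodup_ofList _)).2 (fun cid => (hids cid).symm)
    · rw [hks, List.pairwise_reverse]
      exact hLpw
  -- values function for the popfold
  have hksnd : ks.Nodup := by rw [hks]; exact List.nodup_reverse.2 hLnd
  have hvals : ∀ k ∈ ks, C.get? k = some ((C.get? k).getD (PySem.Set.empty, PySem.Set.empty)) := by
    intro k hk
    obtain ⟨c, hci, _⟩ := (hmemks k).1 hk
    have := PySem.Dict.get?_of_mem_items C hci (by exact hknd)
    rw [this]
    rfl
  have hpop := pv_dict_popfold ks (fun k => (C.get? k).getD (PySem.Set.empty, PySem.Set.empty))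
      C (PySem.Set.ofList gm.1, ([gm.2] : PySem.Set String)) hksnd hvals
  -- the new component equals A's pvNew
  have hacc : ks.foldl (fun a k => pvComb a ((C.get? k).getD (PySem.Set.empty, PySem.Set.empty)))
      (PySem.Set.ofList gm.1, ([gm.2] : PySem.Set String)) = pvNew gm M := by
    have h1 : ks = (L.reverse).map Prod.fst := by rw [hks, List.map_reverse]
    rw [h1, List.foldl_map]
    rw [PySem.List.foldl_congr_mem (L.reverse)
      (fun a p => pvComb a ((C.get? p.1).getD (PySem.Set.empty, PySem.Set.empty)))
      (fun a p => pvComb a p.2) _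
      (by
        intro a p hp
        rw [List.mem_reverse] at hp
        have hpi := (List.mem_filter.1 hp).1
        have hpi' : ((p.1, p.2) : Int × pvComp) ∈ C.items := by
          rw [show ((p.1, p.2) : Int × pvComp) = p from rfl]; exact hpi
        simp only [PySem.Dict.get?_of_mem_items C hpi' (by exact hknd)]
        rfl)]
    rw [pvNew]
    have h2 : M.filter (pvOv gm.1) = L.map Prod.snd := by
      rw [← hM, List.filter_map]
      rfl
    rw [h2, ← List.map_reverse, List.foldl_map]
    have h3 : PySem.Set.ofList [gm.2] = ([gm.2] : PySem.Set String) := rfl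
    rw [h3]
  -- characterize pvStepB
  have hstepB : pvStepB (f, C, n) gm
      = ((pvNew gm M).1.foldl (fun d ix => d.insert ix n) f,
         PySem.Dict.mk (C.items.filter (fun p => !pvOv gm.1 p.2) ++ [(n, pvNew gm M)]),
         n + 1) := by
    rw [pvStepB]
    simp only []
    rw [show (fun (p : PySem.Dict Int (PySem.Set Int × PySem.Set String) × PySem.Set Int × PySem.Set String) cid =>
        match PySem.Dict.pop? p.1 cid with
        | some (c, rest) => (rest, (PySem.Set.union p.2.1 c.1, PySem.Set.union p.2.2 c.2))
        | none => p) = pvPopStepB from rfl]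
    rw [hsorted, hpop, hacc]
    have hflt : C.items.filter (fun p => !(ks.contains p.1)) = C.items.filter (fun p => !pvOv gm.1 p.2) := by
      apply List.filter_congr
      intro p hp
      have : (ks.contains p.1) = pvOv gm.1 p.2 := by
        rw [Bool.eq_iff_iff, List.contains_iff_mem, hmemks p.1]
        constructor
        · rintro ⟨c, hci, hov⟩
          have := hinj (p.1, c) hci p hp rfl
          rw [← this]
          exact hov
        · intro hov
          exact ⟨p.2, by rw [show ((p.1, p.2) : Int × pvComp) = p from rfl]; exact hp, hov⟩
      rw [this]
    rw [hflt]
    have hcontains : (PySem.Dict.mk (C.items.filter (fun p => !pvOv gm.1 p.2))).contains n = false := by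
      rw [show ∀ (d : PySem.Dict Int pvComp) k, d.contains k = d.items.any (fun p => p.1 == k) from fun _ _ => rfl]
      simp only [List.any_eq_false]
      intro p hp
      have hpi := (List.mem_filter.1 hp).1
      have : p.1 < n := hlt p.1 (List.mem_map.2 ⟨p, hpi, rfl⟩)
      simp
      omega
    have := PySem.Dict.items_insert_of_not_contains
      (PySem.Dict.mk (C.items.filter (fun p => !pvOv gm.1 p.2))) (pvNew gm M) hcontains
    apply Prod.ext
    · rfl
    · apply Prod.ext
      · apply PySem.Dict.ext
        rw [this]
      · rfl
  -- membership in the new component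
  have hMfilter : M.filter (pvOv gm.1) = L.map Prod.snd := by
    rw [← hM, List.filter_map]
    rfl
  have hMfilterN : M.filter (fun c => !pvOv gm.1 c) = (C.items.filter (fun p => !pvOv gm.1 p.2)).map Prod.snd := by
    rw [← hM, List.filter_map]
    rfl
  have hmemNew : ∀ ix, ix ∈ (pvNew gm M).1 ↔ ix ∈ gm.1 ∨ ∃ c, c ∈ M.filter (pvOv gm.1) ∧ ix ∈ c.1 := by
    intro ix
    rw [pvNew, pv_mem_fold_union]
    simp only [PySem.Set.mem_ofList, List.mem_reverse]
  rw [hstepB, pv_stepA_eq]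
  refine ⟨?_, ?_, ?_, ?_⟩
  · simp only [List.map_append, List.map_cons, List.map_nil]
    rw [← hMfilterN]
  · simp only [List.map_append, List.map_cons, List.map_nil]
    rw [List.pairwise_append]
    refine ⟨List.Pairwise.sublist ((List.filter_sublist).map Prod.fst) hpw, by simp, ?_⟩
    intro k hk k' hk'
    simp only [List.mem_cons, List.not_mem_nil, or_false] at hk'
    subst hk'
    obtain ⟨p, hp, rfl⟩ := List.mem_map.1 hk
    exact hlt p.1 (List.mem_map.2 ⟨p, (List.mem_filter.1 hp).1, rfl⟩)
  · simp only [List.map_append, List.map_cons, List.map_nil]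
    intro k hk
    rcases List.mem_append.1 hk with hk | hk
    · obtain ⟨p, hp, rfl⟩ := List.mem_map.1 hk
      have := hlt p.1 (List.mem_map.2 ⟨p, (List.mem_filter.1 hp).1, rfl⟩)
      omega
    · simp only [List.mem_cons, List.not_mem_nil, or_false] at hk
      omega
  · intro ix cid
    rw [pv_get?_foldl_insert]
    by_cases hixN : ix ∈ (pvNew gm M).1
    · rw [if_pos hixN]
      constructor
      · rintro h
        have hcid : cid = n := by injection h; omega
        subst hcid
        exact ⟨pvNew gm M, by simp, hixN⟩
      · rintro ⟨c, hc, hixc⟩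
        rcases List.mem_append.1 hc with hc | hc
        · -- (cid, c) among the kept (non-overlapping) entries: impossible
          exfalso
          obtain ⟨hci, hnov⟩ := List.mem_filter.1 hc
          rcases (hmemNew ix).1 hixN with hixg | ⟨c', hc', hixc'⟩
          · have : pvOv gm.1 c = true := (pv_ov_iff gm.1 c).2 ⟨ix, hixg, hixc⟩
            simp [this] at hnov
          · rw [hMfilter] at hc'
            obtain ⟨p', hp', rfl⟩ := List.mem_map.1 hc'
            have hfix1 : f.get? ix = some cid := (hf ix cid).2 ⟨c, hci, hixc⟩
            have hfix2 : f.get? ix = some p'.1 := (hf ix p'.1).2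
              ⟨p'.2, by rw [show ((p'.1, p'.2) : Int × pvComp) = p' from rfl]; exact (List.mem_filter.1 hp').1, hixc'⟩
            have hcidp : cid = p'.1 := by rw [hfix1] at hfix2; injection hfix2
            have : (cid, c) = p' := hinj (cid, c) hci p' (List.mem_filter.1 hp').1 hcidp
            have hov : pvOv gm.1 c = true := by
              have := congrArg Prod.snd this
              simp only at this
              rw [this]
              exact (List.mem_filter.1 hp').2
            simp [hov] at hnov
        · simp only [List.mem_cons, List.not_mem_nil, or_false] at hc
          have : cid = n := congrArg Prod.fst hc
          simp [this]
    · rw [if_neg hixN, hf ix cid]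
      constructor
      · rintro ⟨c, hci, hixc⟩
        refine ⟨c, List.mem_append.2 (.inl (List.mem_filter.2 ⟨hci, ?_⟩)), hixc⟩
        by_cases hov : pvOv gm.1 c = true
        · exfalso
          apply hixN
          apply (hmemNew ix).2
          right
          exact ⟨c, by rw [hMfilter]; exact List.mem_map.2 ⟨(cid, c), List.mem_filter.2 ⟨hci, by simpa using hov⟩, rfl⟩, hixc⟩
        · simp [hov]
      · rintro ⟨c, hc, hixc⟩
        rcases List.mem_append.1 hc with hc | hc
        · exact ⟨c, (List.mem_filter.1 hc).1, hixc⟩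
        · exfalso
          simp only [List.mem_cons, List.not_mem_nil, or_false] at hc
          apply hixN
          have : c = pvNew gm M := congrArg Prod.snd hc
          rw [← this]
          exact hixc

lemma pv_init_inv : pvInv [] PySem.Dict.empty PySem.Dict.empty 0 := by
  refine ⟨rfl, by simp [PySem.Dict.empty], by simp [PySem.Dict.empty], ?_⟩
  intro ix cid
  simp [PySem.Dict.empty, PySem.Dict.get?]

lemma pv_fold_inv (mgs : List (List Int × String)) :
    ∀ (M : List pvComp) (st : PySem.Dict Int Int × PySem.Dict Int pvComp × Int),
    pvInv M st.1 st.2.1 st.2.2 →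
    pvInv (mgs.foldl pvStepA M) (mgs.foldl pvStepB st).1
      (mgs.foldl pvStepB st).2.1 (mgs.foldl pvStepB st).2.2 := by
  induction mgs with
  | nil => intro M st h; exact h
  | cons gm mgs ih =>
    intro M st h
    rw [List.foldl_cons, List.foldl_cons]
    exact ih (pvStepA M gm) (pvStepB st gm) (pv_step_inv M st.1 st.2.1 st.2.2 gm h)

lemma pv_ori_eq (ms : PySem.Set String) :
    pvGetOrientation ms
      = (if !(PySem.Set.inter ms pvD4M).isEmpty && PySem.Set.isdisjoint ms pvBasicM
         then "rotated" else "same") := by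
  rw [pvGetOrientation, ← pv_isEmpty_inter ms pvBasicM, Bool.not_not]

lemma pv_unknown_eq (avail : List String) :
    (!((!(PySem.Set.inter avail pvBasicM).isEmpty) && (!(PySem.Set.inter avail pvD4M).isEmpty)))
      = (PySem.Set.isdisjoint avail pvBasicM || PySem.Set.isdisjoint avail pvD4M) := by
  rw [← pv_isEmpty_inter, ← pv_isEmpty_inter, Bool.not_and, Bool.not_not, Bool.not_not]

lemma pv_ori_singleton (m : String) :
    pvGetOrientation (PySem.Set.ofList [m])
      = (if pvD4M.contains m then "rotated" else "same") := by
  have h0 : PySem.Set.ofList [m] = ([m] : List String) := rfl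
  rw [h0, pvGetOrientation]
  have hi : ∀ t : List String, PySem.Set.inter ([m] : List String) t = if t.contains m then [m] else [] := by
    intro t
    cases h : t.contains m <;> simp [PySem.Set.inter, List.filter_cons, h] <;> first
      | (rw [← Bool.not_eq_true, List.contains_iff_mem] at h; exact h)
      | exact List.contains_iff_mem.1 h
  rw [hi, hi]
  by_cases hd4 : pvD4M.contains m
  · have hm : m = "phash_d4" ∨ m = "dhash_d4" := by
      simpa [pvD4M] using hd4
    have hb : m ∉ pvBasicM := by
      rcases hm with rfl | rfl <;> decide
    have hd4' : m ∈ pvD4M := by rcases hm with rfl | rfl <;> decide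
    simp [hd4', hb]
  · have : m ∉ pvD4M := by
      intro hmem
      rw [List.contains_iff_mem] at hd4
      simp [hmem] at hd4
    simp [this]

-- ===== VERDICT (by name: the statement is the Claim_ definition above) =====
theorem merge_near_groups_py_spec : Claim_equal_merge_near_groups_py := by
  intro mg avail merge _
  unfold Spec_merge_near_groups_py
  simp only [merge_near_groups_py, merge_near_groups_py_alt]
  by_cases hne : mg = []
  · subst hne
    cases merge <;> rfl
  · rw [if_neg hne]
    cases merge
    · simp only [Bool.not_false, reduceIte]
      rw [pv_unknown_eq avail]
      have hmap : mg.map (fun gm =>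
            ((PySem.List.sorted gm.1 (fun x => x) false : List Int), PySem.Set.ofList [gm.2],
              if (PySem.Set.isdisjoint avail pvBasicM || PySem.Set.isdisjoint avail pvD4M) = true then none
              else some (pvGetOrientation (PySem.Set.ofList [gm.2]))))
          = mg.map (fun gm =>
            ((PySem.List.sorted gm.1 (fun x => x) false : List Int), ([gm.2] : PySem.Set String),
              if (PySem.Set.isdisjoint avail pvBasicM || PySem.Set.isdisjoint avail pvD4M) = true then none
              else some (if pvD4M.contains gm.2 then "rotated" else "same"))) := by
        apply List.map_congr_left
        intro gm _
        rw [pv_ori_singleton]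
        rfl
      rw [hmap]
    · simp only [Bool.not_true, Bool.false_eq_true, reduceIte]
      have hinv := pv_fold_inv mg [] (PySem.Dict.empty, PySem.Dict.empty, 0) pv_init_inv
      have hv : (mg.foldl pvStepB (PySem.Dict.empty, PySem.Dict.empty, 0)).2.1.values
          = mg.foldl pvStepA [] := hinv.1
      rw [hv]
      rw [pv_unknown_eq avail]
      have hmap : ∀ (l : List pvComp), l.map (fun c =>
            ((PySem.List.sorted c.1 (fun x => x) false : List Int), c.2,
              if (PySem.Set.isdisjoint avail pvBasicM || PySem.Set.isdisjoint avail pvD4M) = true then none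
              else some (pvGetOrientation c.2)))
          = l.map (fun c =>
            ((PySem.List.sorted c.1 (fun x => x) false : List Int), c.2,
              if (PySem.Set.isdisjoint avail pvBasicM || PySem.Set.isdisjoint avail pvD4M) = true then none
              else some (if !(PySem.Set.inter c.2 pvD4M).isEmpty && PySem.Set.isdisjoint c.2 pvBasicM
                then "rotated" else "same"))) := by
        intro l
        apply List.map_congr_left
        intro c _
        rw [pv_ori_eq]
      rw [hmap]
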